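-- pv_equiv track=rewrite | github.com/vschule/adventcode | 01_inversecaptcha.py | solution
-- ===== SOURCE A (Python) =====
-- def solution(str_number):
--     z = 0
--
--     result = 0
--
--     for x in str_number:
--         if x == z:
--             result += int(x)
--         z = x
--
--     return result
-- ===== SOURCE B (Python) =====
-- def solution(str_number):
--     # Run-length grouping: a maximal run of L equal digits contributes
--     # int(digit) * (L - 1) adjacent matches.
--     runs = []  # [char, count], built in one forward pass
--     for ch in str_number:
--         if runs and runs[-1][0] == ch:
--             runs[-1][1] += 1
--         else:
--             runs.append([ch, 1])
--     result = 0
--     for ch, cnt in runs: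
--         if cnt > 1:
--             result += int(ch) * (cnt - 1)
--     return result
-- ===== Notes on version B (the rewrite author's own statement) =====
-- stated objective: alternative
-- what changed: B first collapses the string into maximal runs of equal characters (run-length encoding) and then sums int(digit)*(L-1) over each run of length L, instead of A's per-character comparison with the previous character.
import Mathlib
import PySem

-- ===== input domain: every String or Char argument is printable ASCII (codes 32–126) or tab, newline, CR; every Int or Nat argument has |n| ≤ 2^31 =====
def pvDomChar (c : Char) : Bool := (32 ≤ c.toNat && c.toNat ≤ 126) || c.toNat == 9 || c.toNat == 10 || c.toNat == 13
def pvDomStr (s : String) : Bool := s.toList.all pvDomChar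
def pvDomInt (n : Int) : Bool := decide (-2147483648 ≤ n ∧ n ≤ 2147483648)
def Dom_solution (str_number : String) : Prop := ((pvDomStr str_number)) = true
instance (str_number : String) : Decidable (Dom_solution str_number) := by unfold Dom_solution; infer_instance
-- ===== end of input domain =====

-- B re-implements the adjacency-match sum by run-length grouping: one honest alternative decomposition, same O(n) cost.


-- ===== PORT A =====
-- int(x) on a single digit character; exact on digits, which is all Pre_ admits at this call site
def dval (c : Char) : Int := (c.toNat : Int) - 48

-- A's loop: z is the previous character (none models the initial z = 0, which equals no character)
def solveA : Option Char → Int → List Char → Int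
  | _, r, [] => r
  | z, r, x :: xs => solveA (some x) (if z = some x then r + dval x else r) xs

def solution (str_number : String) : Int := solveA none 0 str_number.toList

-- ===== PORT B =====
-- one forward pass building runs (reversed: Python appends at the end, this prepends; undone by .reverse)
def stepRun (acc : List (Char × Nat)) (ch : Char) : List (Char × Nat) :=
  match acc with
  | (c, n) :: rest => if c = ch then (c, n + 1) :: rest else (ch, 1) :: (c, n) :: rest
  | [] => [(ch, 1)]

def runTerm (p : Char × Nat) : Int := if 1 < p.2 then dval p.1 * ((p.2 : Int) - 1) else 0

def solution_alt (str_number : String) : Int :=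
  ((str_number.toList.foldl stepRun []).reverse).foldl (fun r p => r + runTerm p) 0

-- ===== PRECONDITION & SPEC =====
-- Pre_ excludes exactly the strings containing two adjacent equal non-digit characters: there both
-- A and B raise ValueError (int() of a non-digit).
def Pre_solution (str_number : String) : Prop :=
  List.IsChain (fun a b => a = b → a.isDigit = true) str_number.toList
instance (str_number : String) : Decidable (Pre_solution str_number) := by unfold Pre_solution; infer_instance
def pvWitness_solution : String := "1122"

def Spec_solution (str_number : String) (out : Int) : Prop := out = solution_alt str_number
instance (str_number : String) (out : Int) : Decidable (Spec_solution str_number out) := by unfold Spec_solution; infer_instance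

-- ===== CLAIM (what is proved, stated in full; the proofs are below) =====
def Claim_equal_solution : Prop := ∀ (str_number : String), Dom_solution str_number → Pre_solution str_number → Spec_solution str_number (solution str_number)

-- ===== LEMMAS AND PROOFS =====
def sumAcc (acc : List (Char × Nat)) : Int := (acc.map runTerm).sum

theorem foldl_add_runTerm (l : List (Char × Nat)) (r : Int) :
    l.foldl (fun r p => r + runTerm p) r = r + (l.map runTerm).sum := by
  induction l generalizing r with
  | nil => simp
  | cons p t ih => simp [List.foldl, ih, add_assoc]

-- the state invariant linking A's (z, result) to B's accumulated run list
def StateOk : Option Char → List (Char × Nat) → Prop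
  | none, [] => True
  | some c', (c, n) :: _ => c = c' ∧ 1 ≤ n
  | _, _ => False

theorem inv (l : List Char) : ∀ (z : Option Char) (acc : List (Char × Nat)) (r : Int),
    StateOk z acc → r = sumAcc acc →
    solveA z r l = sumAcc (l.foldl stepRun acc) := by
  induction l with
  | nil => intro z acc r _ hr; simpa [solveA] using hr
  | cons x xs ih =>
    intro z acc r hok hr
    simp only [solveA, List.foldl]
    cases acc with
    | nil =>
      cases z with
      | none =>
        have : ¬ (none = some x) := by simp
        rw [if_neg this]
        exact ih (some x) [(x, 1)] r (by simp [StateOk]) (by simpa [sumAcc, runTerm] using hr)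
      | some c => exact absurd hok (by simp [StateOk])
    | cons p rest =>
      obtain ⟨c, n⟩ := p
      cases z with
      | none => exact absurd hok (by simp [StateOk])
      | some c' =>
        obtain ⟨hc, hn⟩ : c = c' ∧ 1 ≤ n := hok
        subst hc
        by_cases hx : c = x
        · subst hx
          rw [if_pos rfl]
          simp only [stepRun]
          refine ih (some c) ((c, n + 1) :: rest) _ (by simp [StateOk]) ?_
          have hterm : runTerm (c, n + 1) = runTerm (c, n) + dval c := by
            simp only [runTerm]
            rcases Nat.lt_or_ge 1 n with h | h
            · rw [if_pos (by omega), if_pos h]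
              push_cast
              ring
            · have hn1 : n = 1 := by omega
              subst hn1
              simp
          simp only [sumAcc, List.map, List.sum_cons] at hr ⊢
          rw [hterm, hr]; ring
        · have : ¬ (some c = some x) := by simpa using hx
          rw [if_neg this]
          simp only [stepRun, if_neg hx]
          refine ih (some x) ((x, 1) :: (c, n) :: rest) r (by simp [StateOk]) ?_
          simpa [sumAcc, runTerm] using hr

-- ===== VERDICT (by name: the statement is the Claim_ definition above) =====
theorem solution_spec : Claim_equal_solution := by
  intro s _ _
  unfold Spec_solution solution solution_alt
  rw [foldl_add_runTerm, List.map_reverse, List.sum_reverse, zero_add]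
  exact inv s.toList none [] 0 trivial rfl
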